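-- pv_equiv track=rewrite | github.com/posl/comment_recommendation | script/split_gen/3_time/zh/220_C/9.py | func
-- ===== SOURCE A (Python) =====
-- def func(n, a, x):
--     mod = 1000000007
--     b = a * 100
--     l = len(b)
--     sum = 0
--     for i in range(l):
--         sum += b[i]
--         if sum > x:
--             return i + 1
--     return -1
-- ===== SOURCE B (Python) =====
-- def func(n, a, x):
--     if not a:
--         return -1
--     p = []
--     s = 0
--     for v in a:
--         s += v
--         p.append(s)
--     S = s
--     M = max(p)
--     if S > 0:
--         c = max(0, (x - M) // S + 1)   # first copy index whose best position can exceed x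
--     else:
--         c = 0                          # if copy 0 fails, later copies are no better
--     if c >= 100 or c * S + M <= x:
--         return -1
--     base = c * S
--     for j in range(len(p)):
--         if base + p[j] > x:
--             return c * len(a) + j + 1
--     return -1  # unreachable: c*S + M > x guarantees a hit
-- ===== Notes on version B (the rewrite author's own statement) =====
-- stated objective: faster
-- what changed: B never builds the 100x-repeated list: it computes prefix sums, total S and prefix maximum M of one copy, derives the first qualifying copy index c in closed form ((x-M)//S+1 when S>0, else copy 0 or none), and scans only that single copy.
import Mathlib
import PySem

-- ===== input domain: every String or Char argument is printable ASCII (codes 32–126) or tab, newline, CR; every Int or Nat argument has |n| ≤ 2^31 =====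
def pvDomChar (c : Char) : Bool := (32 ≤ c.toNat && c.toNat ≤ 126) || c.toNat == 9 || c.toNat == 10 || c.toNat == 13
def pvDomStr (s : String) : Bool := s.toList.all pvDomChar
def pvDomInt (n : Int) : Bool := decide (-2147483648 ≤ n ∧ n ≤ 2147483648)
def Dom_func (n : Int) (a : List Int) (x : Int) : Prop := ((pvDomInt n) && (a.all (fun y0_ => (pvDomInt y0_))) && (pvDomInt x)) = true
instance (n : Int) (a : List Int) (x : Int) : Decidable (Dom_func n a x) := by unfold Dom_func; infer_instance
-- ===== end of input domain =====

-- B never materialises the 100×-repeated list: it computes the first qualifying copy index in closed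
-- form from the prefix maximum and the total sum, then scans one copy (objective: faster).

-- ===== PORT A =====
-- the loop "for i in range(l): sum += b[i]; if sum > x: return i+1" over b = a*100,
-- transcribed as structural recursion over b carrying the running sum and index
def scanA (x : Int) : List Int → Int → Int → Int
  | [], _, _ => -1
  | y :: t, s, i => if s + y > x then i + 1 else scanA x t (s + y) (i + 1)

def func (n : Int) (a : List Int) (x : Int) : Int :=
  scanA x (List.flatten (List.replicate 100 a)) 0 0

-- ===== PORT B =====
-- the "for v in a: s += v; p.append(s)" prefix-sum loop of Source B
def prefB : List Int → Int → List Int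
  | [], _ => []
  | v :: t, s => (s + v) :: prefB t (s + v)

-- the final "for j in range(len(p)): if base + p[j] > x: return ..." loop: first index j with base + p[j] > x
def findJ (x base : Int) : List Int → Int → Option Int
  | [], _ => none
  | v :: t, j => if base + v > x then some j else findJ x base t (j + 1)

-- Python's max(p); p is nonempty wherever Source B calls it (the 0 for [] is unreachable)
def maxP : List Int → Int → Int
  | [], m => m
  | v :: t, m => maxP t (max m v)

def listMax : List Int → Int
  | [] => 0
  | v :: t => maxP t v

def func_alt (n : Int) (a : List Int) (x : Int) : Int :=
  if a.isEmpty then -1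
  else
    let p := prefB a 0
    let S := a.sum
    let M := listMax p
    let c := if S > 0 then max 0 (PySem.Int.floordiv (x - M) S + 1) else 0
    if c ≥ 100 ∨ c * S + M ≤ x then -1
    else
      match findJ x (c * S) p 0 with
      | some j => c * (a.length : Int) + j + 1
      | none => -1  -- unreachable (c*S + M > x), as in Source B's trailing return

-- ===== PRECONDITION & SPEC =====
def Spec_func (n : Int) (a : List Int) (x : Int) (out : Int) : Prop := out = func_alt n a x
instance (n : Int) (a : List Int) (x : Int) (out : Int) : Decidable (Spec_func n a x out) := by unfold Spec_func; infer_instance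

-- ===== CLAIM (what is proved, stated in full; the proofs are below) =====
def Claim_equal_func : Prop := ∀ (n : Int) (a : List Int) (x : Int), Dom_func n a x → Spec_func n a x (func n a x)

-- ===== LEMMAS AND PROOFS =====

-- proof-side intermediate: copy-by-copy view of A's scan (fuel = copies left, c = copy index)
def loopC (x S : Int) (p : List Int) (len : Int) : Nat → Int → Int
  | 0, _ => -1
  | k + 1, c =>
    match findJ x (c * S) p 0 with
    | some j => c * len + j + 1
    | none => loopC x S p len k (c + 1)

theorem prefB_shift (t : List Int) (c : Int) : ∀ s, prefB t (c + s) = (prefB t s).map (fun v => c + v) := by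
  induction t with
  | nil => intro s; simp [prefB]
  | cons v t ih =>
    intro s
    simp only [prefB, List.map]
    rw [show c + s + v = c + (s + v) by ring, ih (s + v)]

theorem findJ_map_add (x b c : Int) (p : List Int) : ∀ j, findJ x b (p.map (fun v => c + v)) j = findJ x (b + c) p j := by
  induction p with
  | nil => intro j; simp [findJ]
  | cons v t ih =>
    intro j
    simp only [List.map, findJ, add_assoc, ih]

theorem findJ_start (x b : Int) (p : List Int) : ∀ j k, findJ x b p (j + k) = (findJ x b p j).map (fun r => r + k) := by
  induction p with
  | nil => intro j k; simp [findJ]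
  | cons v t ih =>
    intro j k
    simp only [findJ]
    split
    · rfl
    · have := ih (j + 1) k
      rw [show j + k + 1 = j + 1 + k by ring, this]

theorem scan_split (x : Int) (a : List Int) (rest : List Int) :
    ∀ s i, scanA x (a ++ rest) s i =
      (match findJ x s (prefB a 0) 0 with
       | some j => i + j + 1
       | none => scanA x rest (s + a.sum) (i + (a.length : Int))) := by
  induction a with
  | nil => intro s i; simp [prefB, findJ]
  | cons y t ih =>
    intro s i
    have hpref : prefB t y = (prefB t 0).map (fun v => y + v) := by
      have := prefB_shift t y 0
      simpa using this
    simp only [List.cons_append, scanA, prefB, zero_add]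
    split
    · rename_i h
      have : findJ x s (y :: prefB t y) 0 = some 0 := by
        simp [findJ, h]
      rw [this]; simp
    · rename_i h
      have hfind : findJ x s (y :: prefB t y) 0
          = (findJ x (s + y) (prefB t 0) 0).map (fun r => r + 1) := by
        simp only [findJ]
        rw [if_neg h, hpref, findJ_map_add]
        have := findJ_start x (s + y) (prefB t 0) 0 1
        simpa using this
      rw [hfind, ih (s + y) (i + 1)]
      cases hf : findJ x (s + y) (prefB t 0) 0 with
      | none =>
        simp only [Option.map_none]
        congr 1
        · simp [List.sum_cons]; ring
        · simp [List.length_cons]; ring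
      | some j =>
        simp only [Option.map_some]
        ring

theorem loop_eq (x : Int) (a : List Int) :
    ∀ (k : Nat) (c : Int),
      scanA x (List.flatten (List.replicate k a)) (c * a.sum) (c * (a.length : Int))
        = loopC x a.sum (prefB a 0) (a.length : Int) k c := by
  intro k
  induction k with
  | zero => intro c; simp [scanA, loopC]
  | succ k ih =>
    intro c
    rw [List.replicate_succ, List.flatten_cons, scan_split, loopC]
    cases hf : findJ x (c * a.sum) (prefB a 0) 0 with
    | some j => simp
    | none =>
      simp only
      have h1 : c * a.sum + a.sum = (c + 1) * a.sum := by ring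
      have h2 : c * (a.length : Int) + (a.length : Int) = (c + 1) * (a.length : Int) := by ring
      rw [h1, h2, ih (c + 1)]

theorem findJ_none_iff (x b : Int) (p : List Int) : ∀ j, (findJ x b p j = none ↔ ∀ v ∈ p, b + v ≤ x) := by
  induction p with
  | nil => intro j; simp [findJ]
  | cons v t ih =>
    intro j
    simp only [findJ, List.mem_cons]
    split
    · rename_i h
      constructor
      · intro hc; cases hc
      · intro hall; exact absurd (hall v (Or.inl rfl)) (by omega)
    · rename_i h
      rw [ih (j + 1)]
      constructor
      · intro hall u hu
        rcases hu with rfl | hu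
        · omega
        · exact hall u hu
      · intro hall u hu; exact hall u (Or.inr hu)

theorem maxP_init_le (t : List Int) : ∀ m, m ≤ maxP t m := by
  induction t with
  | nil => intro m; simp [maxP]
  | cons w t ih =>
    intro m
    exact le_trans (le_max_left m w) (ih (max m w))

theorem maxP_ub (t : List Int) : ∀ m v, v ∈ t → v ≤ maxP t m := by
  induction t with
  | nil => intro m v hv; cases hv
  | cons w t ih =>
    intro m v hv
    rcases List.mem_cons.mp hv with rfl | hv
    · exact le_trans (le_max_right m v) (maxP_init_le t (max m v))
    · exact ih (max m w) v hv

theorem maxP_mem (t : List Int) : ∀ m, maxP t m ∈ m :: t := by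
  induction t with
  | nil => intro m; simp [maxP]
  | cons w t ih =>
    intro m
    have := ih (max m w)
    rcases List.mem_cons.mp this with h | h
    · rcases max_choice m w with hm | hm
      · rw [maxP, h, hm]; exact List.mem_cons_self
      · rw [maxP, h, hm]; exact List.mem_cons_of_mem _ List.mem_cons_self
    · exact List.mem_cons_of_mem _ (List.mem_cons_of_mem _ h)

theorem loopC_allfail (x S : Int) (p : List Int) (len : Int) :
    ∀ (k : Nat) (c : Int), (∀ i : Int, c ≤ i → i < c + k → ∀ v ∈ p, i * S + v ≤ x) →
      loopC x S p len k c = -1 := by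
  intro k
  induction k with
  | zero => intro c _; simp [loopC]
  | succ k ih =>
    intro c hall
    rw [loopC]
    have hnone : findJ x (c * S) p 0 = none := by
      rw [findJ_none_iff]
      intro v hv
      exact hall c le_rfl (by push_cast; omega) v hv
    rw [hnone]
    exact ih (c + 1) (fun i h1 h2 v hv => hall i (by omega) (by push_cast at h2 ⊢; omega) v hv)

theorem loopC_reach (x S : Int) (p : List Int) (len : Int) (c : Int) :
    ∀ (k : Nat) (c0 : Int), c0 ≤ c → c < c0 + k →
      (∀ i : Int, c0 ≤ i → i < c → ∀ v ∈ p, i * S + v ≤ x) →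
      findJ x (c * S) p 0 ≠ none →
      loopC x S p len k c0 =
        (match findJ x (c * S) p 0 with
         | some j => c * len + j + 1
         | none => -1) := by
  intro k
  induction k with
  | zero => intro c0 h1 h2 _ _; exfalso; push_cast at h2; omega
  | succ k ih =>
    intro c0 h1 h2 hskip hne
    by_cases hc : c0 = c
    · subst hc
      rw [loopC]
      cases hf : findJ x (c0 * S) p 0 with
      | some j => rfl
      | none => exact absurd hf hne
    · have hlt : c0 < c := lt_of_le_of_ne h1 hc
      rw [loopC]
      have hnone : findJ x (c0 * S) p 0 = none := by
        rw [findJ_none_iff]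
        intro v hv
        exact hskip c0 le_rfl hlt v hv
      rw [hnone]
      exact ih (c0 + 1) (by omega) (by push_cast at h2 ⊢; omega) (fun i ha hb v hv => hskip i (by omega) hb v hv) hne

theorem func_eq_loopC (n : Int) (a : List Int) (x : Int) :
    func n a x = loopC x a.sum (prefB a 0) (a.length : Int) 100 0 := by
  have := loop_eq x a 100 0
  simpa [func] using this

-- ===== VERDICT (by name: the statement is the Claim_ definition above) =====
theorem func_spec : Claim_equal_func := by
  intro n a x _
  unfold Spec_func
  rw [func_eq_loopC]
  cases a with
  | nil =>
    rw [loopC_allfail]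
    · simp [func_alt]
    · intro i _ _ v hv; simp [prefB] at hv
  | cons h t =>
    simp only [func_alt, List.isEmpty_cons, if_neg Bool.false_ne_true]
    set p := prefB (h :: t) 0 with hp
    set S := (h :: t).sum with hS
    set M := listMax p with hMdef
    set c : Int := if S > 0 then max 0 (PySem.Int.floordiv (x - M) S + 1) else 0 with hc
    -- p is a nonempty cons, so listMax's facts apply
    have hpcons : p = (0 + h) :: prefB t (0 + h) := by rw [hp]; rfl
    have hMub : ∀ v ∈ p, v ≤ M := by
      intro v hv
      rw [hpcons] at hv
      rcases List.mem_cons.mp hv with rfl | hv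
      · rw [hMdef, hpcons, listMax]; exact maxP_init_le _ _
      · rw [hMdef, hpcons, listMax]; exact maxP_ub _ _ _ hv
    have hMmem : M ∈ p := by
      rw [hMdef, hpcons, listMax, ← hpcons]
      have := maxP_mem (prefB t (0 + h)) (0 + h)
      rw [← hpcons] at this
      exact this
    have hc0 : 0 ≤ c := by
      rw [hc]; split
      · exact le_max_left _ _
      · exact le_rfl
    -- every copy strictly before c fails at every position
    have hbelow : ∀ i : Int, 0 ≤ i → i < c → i * S + M ≤ x := by
      intro i hi hic
      rw [hc] at hic
      by_cases hSpos : S > 0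
      · rw [if_pos hSpos] at hic
        have hiq : i ≤ PySem.Int.floordiv (x - M) S := by omega
        have := (PySem.Int.le_floordiv_iff_mul_le (a := x - M) (b := S) (q := i) hSpos).mp hiq
        omega
      · rw [if_neg hSpos] at hic; omega
    by_cases hguard : c ≥ 100 ∨ c * S + M ≤ x
    · rw [if_pos hguard]
      apply loopC_allfail
      intro i hi1 hi2 v hv
      have hvM : v ≤ M := hMub v hv
      rcases hguard with hg | hg
      · have := hbelow i hi1 (by omega)
        omega
      · by_cases hSpos : S > 0
        · exfalso
          rw [hc] at hg
          rw [if_pos hSpos] at hg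
          set q := PySem.Int.floordiv (x - M) S with hq
          by_cases hq0 : 0 ≤ q + 1
          · have hcq : max 0 (q + 1) = q + 1 := by omega
            rw [hcq] at hg
            have : q + 1 ≤ q := (PySem.Int.le_floordiv_iff_mul_le hSpos).mpr (by omega)
            omega
          · have hcq : max 0 (q + 1) = 0 := by omega
            rw [hcq] at hg
            have : (0 : Int) ≤ q := (PySem.Int.le_floordiv_iff_mul_le hSpos).mpr (by omega)
            omega
        · have hSle : S ≤ 0 := by omega
          have hcz : c = 0 := by rw [hc, if_neg hSpos]
          rw [hcz] at hg
          have hiS : i * S ≤ 0 := mul_nonpos_iff.mpr (Or.inl ⟨hi1, hSle⟩)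
          omega
    · rw [if_neg hguard]
      push_neg at hguard
      obtain ⟨hc100, hcsx⟩ := hguard
      have hne : findJ x (c * S) p 0 ≠ none := by
        intro hn
        have := (findJ_none_iff x (c * S) p 0).mp hn M hMmem
        omega
      rw [loopC_reach x S p ((h :: t).length : Int) c 100 0 hc0 (by push_cast; omega)
        (fun i hi1 hi2 v hv => le_trans (by have := hMub v hv; omega : i * S + v ≤ i * S + M) (hbelow i hi1 hi2)) hne]
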